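-- pv_equiv track=rewrite | github.com/feirik/Writeups | guessing_game_4/solve.py | make_list_third
-- ===== SOURCE A (Python) =====
-- def make_list_third(false_count_list):
--     zero_false_list = []
--     one_false_list = []
--     two_false_list = []
--     three_false_list = []
--
--     iter = 0
--     for i in false_count_list:
--         if i == 0:
--             zero_false_list.append(iter)
--         if i == 1:
--             one_false_list.append(iter)
--         if i == 2:
--             two_false_list.append(iter)
--         if i == 3:
--             three_false_list.append(iter)
--         iter += 1
--
--     remove_zero = zero_false_list[0:512]
--     remove_one = one_false_list[:1024]
--     remove_two = two_false_list[:512]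
--     remove_three = three_false_list[:0]
--
--     test_list = remove_zero + remove_one + remove_two + remove_three
--
--     return test_list
-- ===== SOURCE B (Python) =====
-- def make_list_third(false_count_list):
--     result = []
--     for val, cap in ((0, 512), (1, 1024), (2, 512)):
--         result += [i for i, x in enumerate(false_count_list) if x == val][:cap]
--     return result
-- ===== Notes on version B (the rewrite author's own statement) =====
-- stated objective: simpler
-- what changed: Replaces the single branching pass that maintains four bucket lists plus a manual counter with a loop over (value, cap) pairs, each doing one enumerate-filter scan sliced to its cap and appended directly to the result; the value-3 bucket (cap 0, always empty) is dropped.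
import Mathlib
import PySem

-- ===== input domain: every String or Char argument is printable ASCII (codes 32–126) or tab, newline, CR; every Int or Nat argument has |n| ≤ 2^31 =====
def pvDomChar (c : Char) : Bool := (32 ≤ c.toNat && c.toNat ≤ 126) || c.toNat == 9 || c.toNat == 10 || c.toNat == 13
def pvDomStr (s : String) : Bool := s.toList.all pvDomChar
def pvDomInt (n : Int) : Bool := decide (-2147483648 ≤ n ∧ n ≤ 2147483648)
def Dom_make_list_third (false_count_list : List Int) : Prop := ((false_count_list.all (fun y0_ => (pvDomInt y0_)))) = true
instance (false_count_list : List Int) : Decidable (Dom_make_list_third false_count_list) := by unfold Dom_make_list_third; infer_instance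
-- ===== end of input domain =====

-- B replaces A's single branching pass over four bucket lists with a loop over (value, cap) pairs,
-- each doing one filtered enumerate scan sliced to its cap; objective: simpler.


-- ===== PORT A =====
-- loop state: (zero_false_list, one_false_list, two_false_list, three_false_list, iter)
def make_list_third (false_count_list : List Int) : List Int :=
  let st := false_count_list.foldl
    (fun (st : List Int × List Int × List Int × List Int × Int) (i : Int) =>
      let (z, o, t, th, it) := st
      let z := if i = 0 then z ++ [it] else z
      let o := if i = 1 then o ++ [it] else o
      let t := if i = 2 then t ++ [it] else t
      let th := if i = 3 then th ++ [it] else th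
      (z, o, t, th, it + 1))
    (([], [], [], [], 0) : List Int × List Int × List Int × List Int × Int)
  let remove_zero := PySem.List.slice st.1 (some 0) (some 512)
  let remove_one := PySem.List.slice st.2.1 none (some 1024)
  let remove_two := PySem.List.slice st.2.2.1 none (some 512)
  let remove_three := PySem.List.slice st.2.2.2.1 none (some 0)
  remove_zero ++ remove_one ++ remove_two ++ remove_three

-- ===== PORT B =====
def make_list_third_alt (false_count_list : List Int) : List Int :=
  [((0:Int), (512:Nat)), (1, 1024), (2, 512)].foldl
    (fun result vc =>
      result ++
        (((PySem.List.enumerate false_count_list 0).filter (fun p => p.2 = vc.1)).map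
          Prod.fst).take vc.2)
    []

-- ===== PRECONDITION & SPEC =====
def Spec_make_list_third (false_count_list : List Int) (out : List Int) : Prop := out = make_list_third_alt false_count_list
instance (false_count_list : List Int) (out : List Int) : Decidable (Spec_make_list_third false_count_list out) := by unfold Spec_make_list_third; infer_instance

-- ===== CLAIM (what is proved, stated in full; the proofs are below) =====
def Claim_equal_make_list_third : Prop := ∀ (false_count_list : List Int), Dom_make_list_third false_count_list → Spec_make_list_third false_count_list (make_list_third false_count_list)

-- ===== LEMMAS AND PROOFS =====

-- the filtered index bucket for value v, enumerating from k
def pvBucket (l : List Int) (k v : Int) : List Int :=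
  ((PySem.List.enumerate l k).filter (fun p => p.2 = v)).map Prod.fst

theorem pvBucket_nil (k v : Int) : pvBucket [] k v = [] := rfl

theorem pvBucket_cons (x : Int) (l : List Int) (k v : Int) :
    pvBucket (x :: l) k v = (if x = v then [k] else []) ++ pvBucket l (k + 1) v := by
  simp [pvBucket, PySem.List.enumerate_cons, List.filter_cons]
  split_ifs <;> simp_all

-- A's fold, started from any state, extends each bucket by the corresponding filtered scan
theorem pvFold_eq (l : List Int) : ∀ (z o t th : List Int) (k : Int),
    l.foldl
      (fun (st : List Int × List Int × List Int × List Int × Int) (i : Int) =>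
        let (z, o, t, th, it) := st
        let z := if i = 0 then z ++ [it] else z
        let o := if i = 1 then o ++ [it] else o
        let t := if i = 2 then t ++ [it] else t
        let th := if i = 3 then th ++ [it] else th
        (z, o, t, th, it + 1))
      ((z, o, t, th, k) : List Int × List Int × List Int × List Int × Int)
    = (z ++ pvBucket l k 0, o ++ pvBucket l k 1, t ++ pvBucket l k 2,
       th ++ pvBucket l k 3, k + l.length) := by
  induction l with
  | nil => intro z o t th k; simp [pvBucket_nil]
  | cons x l ih =>
    intro z o t th k
    simp only [List.foldl_cons]
    rw [ih]
    simp only [pvBucket_cons, List.length_cons]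
    split_ifs <;> simp_all <;> omega

theorem make_list_third_spec : Claim_equal_make_list_third := by
  intro l _
  unfold Spec_make_list_third make_list_third make_list_third_alt
  rw [pvFold_eq l [] [] [] [] 0]
  simp only [pvBucket]
  rw [PySem.List.slice_toNat _ (by norm_num) (by norm_num),
      PySem.List.slice_to _ (by norm_num), PySem.List.slice_to _ (by norm_num),
      PySem.List.slice_to _ (by norm_num)]
  simp
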